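-- pv_equiv track=rewrite | github.com/aabarbosa/Python | .py/125.py | remove_menores
-- ===== SOURCE A (Python) =====
-- def remove_menores(N,lista):
-- 	menores = []
-- 	for v in lista:
-- 		if v < N:
-- 			menores.append(v)
-- 	for menor in menores:
-- 		lista.remove(menor)
-- 	return len(menores)
-- ===== SOURCE B (Python) =====
-- def remove_menores(N, lista):
--     orig = len(lista)
--     w = 0
--     for i in range(orig):
--         v = lista[i]
--         if not (v < N):
--             lista[w] = v
--             w += 1
--     del lista[w:]
--     return orig - w
-- ===== Notes on version B (the rewrite author's own statement) =====
-- stated objective: faster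
-- what changed: B compacts the list in place with a write cursor in one pass and returns len-kept, instead of collecting the small elements and rescanning with list.remove for each.
import Mathlib
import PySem

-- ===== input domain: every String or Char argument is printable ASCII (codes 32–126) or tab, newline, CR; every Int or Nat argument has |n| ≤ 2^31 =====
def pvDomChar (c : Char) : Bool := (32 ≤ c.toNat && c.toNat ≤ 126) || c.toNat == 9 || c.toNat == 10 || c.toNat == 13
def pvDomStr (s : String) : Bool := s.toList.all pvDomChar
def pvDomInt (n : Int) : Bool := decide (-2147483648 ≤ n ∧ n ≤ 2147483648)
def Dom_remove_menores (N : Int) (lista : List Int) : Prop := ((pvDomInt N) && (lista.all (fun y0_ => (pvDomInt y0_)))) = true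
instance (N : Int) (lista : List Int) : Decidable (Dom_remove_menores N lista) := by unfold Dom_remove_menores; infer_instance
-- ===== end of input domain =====

-- ===== PORT A =====
-- A collects the elements < N, removes each from `lista`, and returns their count.
-- A mutates `lista` in place (Python); the equivalence proved here is about the RETURN value
-- (B performs the corresponding mutation in Source B). The removal loop cannot raise, since each
-- occurrence of an element < N appears in `menores` once per occurrence in `lista`.
def remove_menores (N : Int) (lista : List Int) : Int :=
  let menores := lista.foldl (fun acc v => if v < N then acc ++ [v] else acc) ([] : List Int)
  let _lista := menores.foldl (fun l m => (PySem.List.remove? l m).getD l) lista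
  (menores.length : Int)

-- ===== PORT B =====
-- B walks the list once with a write cursor w, keeping v when ¬ (v < N), and returns orig - w.
-- The in-place write lista[w] = v has w ≤ i, so it never changes an element still to be read;
-- the port therefore folds over the original list carrying w.
def remove_menores_alt (N : Int) (lista : List Int) : Int :=
  let orig : Int := lista.length
  let w := lista.foldl (fun w v => if ¬ (v < N) then w + 1 else w) (0 : Int)
  orig - w

-- ===== PRECONDITION & SPEC =====
def Spec_remove_menores (N : Int) (lista : List Int) (out : Int) : Prop := out = remove_menores_alt N lista
instance (N : Int) (lista : List Int) (out : Int) : Decidable (Spec_remove_menores N lista out) := by unfold Spec_remove_menores; infer_instance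

-- ===== CLAIM (what is proved, stated in full; the proofs are below) =====
def Claim_equal_remove_menores : Prop := ∀ (N : Int) (lista : List Int), Dom_remove_menores N lista → Spec_remove_menores N lista (remove_menores N lista)

-- ===== LEMMAS AND PROOFS =====
theorem pv_lenA (N : Int) : ∀ (l acc : List Int),
    ((l.foldl (fun acc v => if v < N then acc ++ [v] else acc) acc).length : Int)
      = acc.length + l.countP (fun v => decide (v < N)) := by
  intro l
  induction l with
  | nil => intro acc; simp
  | cons x xs ih =>
    intro acc
    simp only [List.foldl_cons, List.countP_cons]
    by_cases h : x < N
    · simp [h, ih]; ring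
    · simp [h, ih]
theorem pv_wB (N : Int) : ∀ (l : List Int) (w : Int),
    l.foldl (fun w v => if ¬ (v < N) then w + 1 else w) w
      = w + l.countP (fun v => decide (¬ (v < N))) := by
  intro l
  induction l with
  | nil => intro w; simp
  | cons x xs ih =>
    intro w
    rw [List.foldl_cons, List.countP_cons]
    by_cases h : x < N
    · rw [if_neg (by simp [h]), ih]
      simp [h]
    · rw [if_pos (by simp [h]), ih]
      simp [h]; ring

theorem pv_count_split (N : Int) (l : List Int) :
    l.countP (fun v => decide (v < N)) + l.countP (fun v => decide (¬ (v < N))) = l.length := by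
  induction l with
  | nil => simp
  | cons x xs ih =>
    rw [List.countP_cons, List.countP_cons, List.length_cons]
    by_cases h : x < N
    · rw [if_pos (by simpa using h), if_neg (by simpa using h)]; omega
    · rw [if_neg (by simpa using h), if_pos (by simpa using h)]; omega

-- ===== VERDICT (by name: the statement is the Claim_ definition above) =====
theorem remove_menores_spec : Claim_equal_remove_menores := by
  intro N lista _
  unfold Spec_remove_menores remove_menores remove_menores_alt
  rw [pv_lenA, pv_wB]
  have h := pv_count_split N lista
  simp only [List.length_nil]
  omega
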